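-- pv_equiv track=rewrite | github.com/jtannahill/art-generator | lambdas/site_rebuild/handler.py | group_by_date
-- ===== SOURCE A (Python) =====
-- from collections import defaultdict
--
-- def group_by_date(items, prefix="WEATHER#"):
--     """Groups items by date extracted from PK (e.g. 'WEATHER#2026-03-15' -> '2026-03-15').
--
--     Returns dict of date -> list of items, sorted by date descending.
--     """
--     groups = defaultdict(list)
--     for item in items:
--         pk = item.get("PK", "")
--         if pk.startswith(prefix):
--             date = pk[len(prefix):]
--             groups[date].append(item)
--
--     # Sort by date descending
--     return dict(sorted(groups.items(), key=lambda x: x[0], reverse=True))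
-- ===== SOURCE B (Python) =====
-- def group_by_date(items, prefix="WEATHER#"):
--     """Groups items by date extracted from PK, dict sorted by date descending."""
--     def key(item):
--         pk = item.get("PK", "")
--         return pk[len(prefix):] if pk.startswith(prefix) else None
--     dates = sorted({d for d in map(key, items) if d is not None}, reverse=True)
--     return {d: [it for it in items if key(it) == d] for d in dates}
-- ===== Notes on version B (the rewrite author's own statement) =====
-- stated objective: alternative
-- what changed: Instead of accumulating a defaultdict during one pass and then sorting its items, B first computes the sorted-descending set of distinct dates and then builds the result with one filtering scan per date (a dict comprehension), with no mutable dict accumulation.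
import Mathlib
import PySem

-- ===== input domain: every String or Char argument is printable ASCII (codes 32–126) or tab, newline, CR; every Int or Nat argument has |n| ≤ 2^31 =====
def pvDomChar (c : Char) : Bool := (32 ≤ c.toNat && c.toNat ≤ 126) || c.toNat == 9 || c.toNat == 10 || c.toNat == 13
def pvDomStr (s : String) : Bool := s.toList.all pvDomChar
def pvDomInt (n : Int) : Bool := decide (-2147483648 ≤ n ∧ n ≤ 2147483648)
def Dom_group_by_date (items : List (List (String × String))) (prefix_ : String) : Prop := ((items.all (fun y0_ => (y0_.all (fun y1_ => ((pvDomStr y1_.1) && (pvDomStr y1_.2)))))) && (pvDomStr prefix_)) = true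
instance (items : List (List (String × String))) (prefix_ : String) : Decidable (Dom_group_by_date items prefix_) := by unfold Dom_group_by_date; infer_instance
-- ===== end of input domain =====

-- B replaces A's defaultdict-accumulate-then-sort-items by sorting the distinct dates
-- descending first and building the groups with one filtering scan per date (alternative decomposition).


-- ===== PORT A =====
-- loop: groups[date].append(item) for matching items, then dict(sorted(groups.items(), key=fst, reverse=True))
def group_by_date (items : List (List (String × String))) (prefix_ : String) : List (String × List (List (String × String))) :=
  let groups := items.foldl (fun g item =>
    let pk := (PySem.Dict.ofList item).getD "PK" ""
    if PySem.Str.startswith pk prefix_ then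
      g.modify (PySem.Str.slice pk (some (PySem.Str.len prefix_)) none) [] (· ++ [item])
    else g) PySem.Dict.empty
  PySem.List.sorted groups.items (fun x => x.1) true

-- ===== PORT B =====
-- B's helper key(item): the date suffix if PK starts with prefix, else None
def pvKey (prefix_ : String) (item : List (String × String)) : Option String :=
  let pk := (PySem.Dict.ofList item).getD "PK" ""
  if PySem.Str.startswith pk prefix_ then
    some (PySem.Str.slice pk (some (PySem.Str.len prefix_)) none)
  else none

def group_by_date_alt (items : List (List (String × String))) (prefix_ : String) : List (String × List (List (String × String))) :=
  let dates := PySem.List.sorted (PySem.Set.ofList (items.filterMap (pvKey prefix_))) (fun d => d) true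
  dates.map (fun d => (d, items.filter (fun it => pvKey prefix_ it == some d)))

-- ===== PRECONDITION & SPEC =====
def Spec_group_by_date (items : List (List (String × String))) (prefix_ : String) (out : List (String × List (List (String × String)))) : Prop := out = group_by_date_alt items prefix_
instance (items : List (List (String × String))) (prefix_ : String) (out : List (String × List (List (String × String)))) : Decidable (Spec_group_by_date items prefix_ out) := by unfold Spec_group_by_date; infer_instance

-- ===== CLAIM (what is proved, stated in full; the proofs are below) =====
def Claim_equal_group_by_date : Prop := ∀ (items : List (List (String × String))) (prefix_ : String), Dom_group_by_date items prefix_ → Spec_group_by_date items prefix_ (group_by_date items prefix_)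

-- ===== LEMMAS AND PROOFS =====

-- the (date, item) pairs of the matching items, in order
def pvPairs (prefix_ : String) (items : List (List (String × String))) : List (String × List (String × String)) :=
  items.filterMap (fun it => (pvKey prefix_ it).map (fun d => (d, it)))

lemma pvFold_eq (prefix_ : String) (items : List (List (String × String)))
    (g : PySem.Dict String (List (List (String × String)))) :
    items.foldl (fun g item =>
      let pk := (PySem.Dict.ofList item).getD "PK" ""
      if PySem.Str.startswith pk prefix_ then
        g.modify (PySem.Str.slice pk (some (PySem.Str.len prefix_)) none) [] (· ++ [item])
      else g) g
    = (pvPairs prefix_ items).foldl (fun d p => d.modify p.1 [] (· ++ [p.2])) g := by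
  induction items generalizing g with
  | nil => rfl
  | cons it rest ih =>
    simp only [pvPairs, List.filterMap_cons, pvKey, List.foldl_cons]
    by_cases h : PySem.Str.startswith ((PySem.Dict.ofList it).getD "PK" "") prefix_ = true
    · simp only [h, if_pos, Option.map_some, List.foldl_cons]
      exact ih _
    · simp only [eq_false_of_ne_true h, if_neg, Bool.false_eq_true, not_false_iff,
        Option.map_none]
      exact ih _

lemma pvPairs_map_fst (prefix_ : String) (items : List (List (String × String))) :
    (pvPairs prefix_ items).map (·.1) = items.filterMap (pvKey prefix_) := by
  induction items with
  | nil => rfl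
  | cons it rest ih =>
    simp only [pvPairs, List.filterMap_cons] at *
    cases h : pvKey prefix_ it <;> simp [ih]

lemma pvPairs_filter_snd (prefix_ : String) (items : List (List (String × String))) (d : String) :
    ((pvPairs prefix_ items).filter (fun p => p.1 == d)).map (·.2)
      = items.filter (fun it => pvKey prefix_ it == some d) := by
  induction items with
  | nil => rfl
  | cons it rest ih =>
    simp only [pvPairs, List.filterMap_cons, List.filter_cons] at *
    cases h : pvKey prefix_ it with
    | none => simp [ih]
    | some k =>
      by_cases hk : k = d
      · subst hk; simp [ih]
      · simp [hk, ih]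

theorem group_by_date_spec_aux (items : List (List (String × String))) (prefix_ : String) :
    group_by_date items prefix_ = group_by_date_alt items prefix_ := by
  unfold group_by_date group_by_date_alt
  rw [pvFold_eq]
  set P := pvPairs prefix_ items with hP
  set groups := P.foldl (fun d p => d.modify p.1 [] (· ++ [p.2])) PySem.Dict.empty with hg
  have hkeys : groups.keys = PySem.Set.ofList (items.filterMap (pvKey prefix_)) := by
    rw [hg, PySem.Dict.keys_foldl_modify_key P (fun p => p.1) [] (fun _ p v => v ++ [p.2])]
    rw [PySem.Dict.keys_empty]
    show PySem.Set.update ([] : PySem.Set String) (P.map (·.1)) = _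
    rw [pvPairs_map_fst]
    rfl
  have hnodup : groups.keys.Nodup := by
    rw [hkeys]; exact PySem.Set.nodup_ofList _
  have hget : ∀ d, groups.getD d [] = items.filter (fun it => pvKey prefix_ it == some d) := by
    intro d
    rw [hg, PySem.Dict.getD_foldl_modify_append P PySem.Dict.empty d,
      PySem.Dict.getD_empty, List.nil_append, pvPairs_filter_snd]
  have hitems : groups.items
      = groups.keys.map (fun k => (k, items.filter (fun it => pvKey prefix_ it == some k))) := by
    rw [PySem.Dict.items_eq_map_keys groups hnodup []]
    exact List.map_congr_left fun k _ => by rw [hget k]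
  set K := PySem.Set.ofList (items.filterMap (pvKey prefix_)) with hK
  set f : String → String × List (List (String × String)) :=
    fun d => (d, items.filter (fun it => pvKey prefix_ it == some d)) with hf
  set S := PySem.List.sorted K (fun d => d) true with hS
  have hSperm : S.Perm K := PySem.List.sorted_perm K (fun d => d) true
  have hSnodup : S.Nodup := hSperm.symm.nodup (PySem.Set.nodup_ofList _)
  have hSgt : S.Pairwise (fun a b => b < a) := by
    have h1 : S.Pairwise (fun a b : String => b ≤ a) :=
      PySem.List.sorted_pairwise_rev K (fun d => d)
    have h2 : S.Pairwise (fun a b : String => a ≠ b) := hSnodup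
    exact (h1.and h2).imp fun h => lt_of_le_of_ne h.1 h.2.symm
  have : PySem.List.sorted groups.items (fun x => x.1) true = S.map f := by
    apply PySem.List.sorted_rev_eq_of_perm_of_pairwise_gt
    · rw [hitems, hkeys]
      exact hSperm.map f
    · rw [List.pairwise_map]
      exact hSgt
  rw [this]

-- ===== VERDICT (by name: the statement is the Claim_ definition above) =====
theorem group_by_date_spec : Claim_equal_group_by_date := by
  intro items prefix_ _
  unfold Spec_group_by_date
  exact group_by_date_spec_aux items prefix_
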